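-- pv_equiv track=rewrite | github.com/Camilo-6/SeptimoSemestre | Cr/Tareas/Tarea2/Ejercicio9/Ejercicio9.py | agrupar_factores
-- ===== SOURCE A (Python) =====
-- def agrupar_factores(factores):
--     factores_agrupados = {}
--     for factor in factores:
--         if factor in factores_agrupados:
--             factores_agrupados[factor] += 1
--         else:
--             factores_agrupados[factor] = 1
--     return factores_agrupados
-- ===== SOURCE B (Python) =====
-- def agrupar_factores(factores):
--     # Two-phase: collect distinct factors (first-appearance order), then tally each with count().
--     return {x: factores.count(x) for x in dict.fromkeys(factores)}
-- ===== Notes on version B (the rewrite author's own statement) =====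
-- stated objective: alternative
-- what changed: Replaced A's single streaming pass that increments per-key counts in a dict with a two-phase strategy: first collect the distinct factors, then build the dict by counting each distinct value with list.count.
import Mathlib
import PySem

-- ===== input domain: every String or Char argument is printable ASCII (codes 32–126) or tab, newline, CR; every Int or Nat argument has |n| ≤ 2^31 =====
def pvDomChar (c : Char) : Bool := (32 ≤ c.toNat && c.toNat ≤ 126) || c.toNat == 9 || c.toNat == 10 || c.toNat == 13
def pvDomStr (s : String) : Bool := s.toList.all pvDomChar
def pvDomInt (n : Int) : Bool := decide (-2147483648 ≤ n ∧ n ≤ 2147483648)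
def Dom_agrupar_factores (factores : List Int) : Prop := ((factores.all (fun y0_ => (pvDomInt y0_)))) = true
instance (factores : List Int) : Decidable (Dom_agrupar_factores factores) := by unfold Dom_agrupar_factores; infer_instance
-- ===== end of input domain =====

-- B builds the dict in two phases (distinct factors first, then count each); A streams once incrementing counts.

-- ===== PORT A =====
-- for factor in factores: if factor in d: d[factor] += 1 else d[factor] = 1; return d (as items list)
def agrupar_factores (factores : List Int) : List (Int × Int) :=
  (factores.foldl
    (fun d factor =>
      if d.contains factor then d.insert factor (d.getD factor 0 + 1)
      else d.insert factor 1)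
    (PySem.Dict.empty : PySem.Dict Int Int)).items

-- ===== PORT B =====
-- {x: factores.count(x) for x in dict.fromkeys(factores)}
def agrupar_factores_alt (factores : List Int) : List (Int × Int) :=
  (PySem.List.dedup factores).map (fun x => (x, (factores.count x : Int)))

-- ===== PRECONDITION & SPEC =====
def Spec_agrupar_factores (factores : List Int) (out : List (Int × Int)) : Prop := out = agrupar_factores_alt factores
instance (factores : List Int) (out : List (Int × Int)) : Decidable (Spec_agrupar_factores factores out) := by unfold Spec_agrupar_factores; infer_instance

-- ===== CLAIM (what is proved, stated in full; the proofs are below) =====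
def Claim_equal_agrupar_factores : Prop := ∀ (factores : List Int), Dom_agrupar_factores factores → Spec_agrupar_factores factores (agrupar_factores factores)

-- ===== LEMMAS AND PROOFS =====

-- A's branching step ('if factor in d: +=1 else: =1') is pointwise the counter step 'd[x] = d.get(x,0)+1'.
theorem agrupar_step_eq :
    (fun (d : PySem.Dict Int Int) factor =>
      if d.contains factor then d.insert factor (d.getD factor 0 + 1)
      else d.insert factor 1)
    = fun d x => d.insert x (d.getD x 0 + 1) := by
  funext d x
  by_cases h : d.contains x
  · simp [h]
  · simp only [Bool.not_eq_true] at h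
    simp [h, PySem.Dict.getD_of_not_contains (h := h)]

-- ===== VERDICT (by name: the statement is the Claim_ definition above) =====
theorem agrupar_factores_spec : Claim_equal_agrupar_factores := by
  intro factores _
  unfold Spec_agrupar_factores agrupar_factores agrupar_factores_alt
  rw [agrupar_step_eq, PySem.Dict.foldl_insert_getD_add_one_eq_counter,
    PySem.Dict.items_counter, PySem.List.dedup_eq_ofList]
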